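-- pv_equiv track=rewrite | github.com/HydrogenAcid/PDF-extractor-personalizado | vowels.py | _positions_of_chars
-- ===== SOURCE A (Python) =====
-- from typing import Dict, List, Tuple
--
-- def _positions_of_chars(text: str, targets: set[str], max_chars: int) -> Dict[str, List[int]]:
--     # guarda posiciones (índices) para cada target, limitado a max_chars
--     pos: Dict[str, List[int]] = {t: [] for t in targets}
--     upto = min(len(text), max_chars)
--     for i in range(upto):
--         ch = text[i]
--         if ch in pos:
--             pos[ch].append(i)
--     return pos
-- ===== SOURCE B (Python) =====
-- def _positions_of_chars(text: str, targets: set[str], max_chars: int):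
--     # One bounded pass per target: dict comprehension collecting matching indices.
--     upto = min(len(text), max_chars)
--     return {t: [i for i in range(upto) if text[i] == t] for t in targets}
-- ===== Notes on version B (the rewrite author's own statement) =====
-- stated objective: simpler
-- what changed: Replaces A's dict-of-empty-lists plus a single indexed pass with membership-guarded appends by a dict comprehension that scans the bounded prefix once per target, collecting the matching indices directly.
import Mathlib
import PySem

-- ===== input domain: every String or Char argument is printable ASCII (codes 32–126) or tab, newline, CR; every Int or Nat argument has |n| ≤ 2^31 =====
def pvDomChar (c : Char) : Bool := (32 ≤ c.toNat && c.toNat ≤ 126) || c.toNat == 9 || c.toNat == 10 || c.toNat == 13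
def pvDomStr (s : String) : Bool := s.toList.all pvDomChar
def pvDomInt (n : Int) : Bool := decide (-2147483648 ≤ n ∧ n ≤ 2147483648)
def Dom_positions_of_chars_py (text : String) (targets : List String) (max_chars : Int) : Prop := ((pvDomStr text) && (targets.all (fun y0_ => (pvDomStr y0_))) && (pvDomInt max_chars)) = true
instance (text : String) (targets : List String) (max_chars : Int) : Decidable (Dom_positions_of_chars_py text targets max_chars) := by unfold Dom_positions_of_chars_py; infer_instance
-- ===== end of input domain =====

-- B replaces A's single guarded pass over the text by a dict comprehension doing one bounded scan per target (simpler).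

-- ===== PORT A =====
-- text[i] as a one-character string; i is always in range in A's loop, so the "" fallback is unreachable
def pvCharAt (text : String) (i : Int) : String :=
  ((PySem.Str.pyGet? text i).map (fun c => String.ofList [c])).getD ""

def positions_of_chars_py (text : String) (targets : List String) (max_chars : Int) : List (String × List Int) :=
  let pos := targets.foldl (fun d t => d.insert t ([] : List Int)) PySem.Dict.empty
  let upto := min (PySem.Str.len text) max_chars
  ((PySem.List.pyRange 0 upto 1).foldl
     (fun d i =>
       let ch := pvCharAt text i
       if d.contains ch then d.modify ch [] (· ++ [i]) else d)
     pos).items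

-- ===== PORT B =====
def positions_of_chars_py_alt (text : String) (targets : List String) (max_chars : Int) : List (String × List Int) :=
  let upto := min (PySem.Str.len text) max_chars
  ((targets.foldl
      (fun d t => d.insert t ((PySem.List.pyRange 0 upto 1).filter (fun i => pvCharAt text i == t)))
      PySem.Dict.empty)).items

-- ===== PRECONDITION & SPEC =====
def Spec_positions_of_chars_py (text : String) (targets : List String) (max_chars : Int) (out : List (String × List Int)) : Prop := out = positions_of_chars_py_alt text targets max_chars
instance (text : String) (targets : List String) (max_chars : Int) (out : List (String × List Int)) : Decidable (Spec_positions_of_chars_py text targets max_chars out) := by unfold Spec_positions_of_chars_py; infer_instance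

-- ===== CLAIM (what is proved, stated in full; the proofs are below) =====
def Claim_equal_positions_of_chars_py : Prop := ∀ (text : String) (targets : List String) (max_chars : Int), Dom_positions_of_chars_py text targets max_chars → Spec_positions_of_chars_py text targets max_chars (positions_of_chars_py text targets max_chars)

-- ===== LEMMAS AND PROOFS =====

-- value at k of a dict built by inserting a key-determined value for each element of l
theorem foldl_insert_getD (f : String → List Int) (l : List String)
    (d : PySem.Dict String (List Int)) (k : String) :
    (l.foldl (fun d t => d.insert t (f t)) d).getD k [] =
      if k ∈ l then f k else d.getD k [] := by
  induction l generalizing d with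
  | nil => simp
  | cons t rest ih =>
    simp only [List.foldl_cons, ih, PySem.Dict.getD_insert, List.mem_cons]
    by_cases hk : k ∈ rest
    · simp [hk]
    · by_cases he : k = t <;> simp [hk, he]

-- A's guarded-append loop never changes the key list
theorem loopA_keys (ch : Int → String) (is : List Int) (d : PySem.Dict String (List Int)) :
    (is.foldl (fun d i => if d.contains (ch i) then d.modify (ch i) [] (· ++ [i]) else d) d).keys
      = d.keys := by
  induction is generalizing d with
  | nil => rfl
  | cons i rest ih =>
    simp only [List.foldl_cons]
    by_cases h : d.contains (ch i) = true
    · rw [ih, if_pos h]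
      exact PySem.Dict.keys_insert_of_contains _ _ h
    · rw [ih, if_neg h]

-- value at a present key after A's loop = old value ++ indices whose character is k
theorem loopA_getD (ch : Int → String) (is : List Int) (d : PySem.Dict String (List Int))
    (k : String) (hk : d.contains k = true) :
    (is.foldl (fun d i => if d.contains (ch i) then d.modify (ch i) [] (· ++ [i]) else d) d).getD k []
      = d.getD k [] ++ is.filter (fun i => ch i == k) := by
  induction is generalizing d with
  | nil => simp
  | cons i rest ih =>
    simp only [List.foldl_cons, List.filter_cons]
    by_cases h : d.contains (ch i) = true
    · rw [if_pos h,
        show (d.modify (ch i) [] fun x => x ++ [i]) = d.insert (ch i) (d.getD (ch i) [] ++ [i]) from rfl]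
      have hk' : (d.insert (ch i) (d.getD (ch i) [] ++ [i])).contains k = true := by
        rw [PySem.Dict.contains_insert]
        simp [hk]
      rw [ih _ hk', PySem.Dict.getD_insert]
      by_cases he : k = ch i
      · subst he
        rw [if_pos rfl, beq_self_eq_true, if_pos rfl, List.append_assoc, List.singleton_append]
      · have hne : (ch i == k) = false := beq_eq_false_iff_ne.mpr (fun hcontr => he hcontr.symm)
        rw [if_neg he, hne]
        simp only [Bool.false_eq_true, if_false]
    · rw [if_neg h, ih _ hk]
      have hne : (ch i == k) = false := by
        cases hx : (ch i == k) with
        | false => rfl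
        | true =>
          rw [beq_iff_eq.mp hx] at h
          exact absurd hk h
      rw [hne]
      simp only [Bool.false_eq_true, if_false]

theorem positions_keys_base (targets : List String) :
    ((targets.foldl (fun d t => d.insert t ([] : List Int)) PySem.Dict.empty)).keys
      = PySem.Set.ofList targets := by
  rw [PySem.Dict.keys_foldl_insert]
  simp [PySem.Set.update_nil_left]

theorem positions_keys_alt (f : String → List Int) (targets : List String) :
    ((targets.foldl (fun d t => d.insert t (f t)) PySem.Dict.empty)).keys
      = PySem.Set.ofList targets := by
  rw [PySem.Dict.keys_foldl_insert]
  simp [PySem.Set.update_nil_left]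

-- ===== VERDICT (by name: the statement is the Claim_ definition above) =====
theorem positions_of_chars_py_spec : Claim_equal_positions_of_chars_py := by
  intro text targets max_chars _
  unfold Spec_positions_of_chars_py positions_of_chars_py positions_of_chars_py_alt
  set upto := min (PySem.Str.len text) max_chars with hupto
  set ch : Int → String := pvCharAt text with hch
  set idxs : String → List Int :=
    fun t => (PySem.List.pyRange 0 upto 1).filter (fun i => ch i == t) with hidxs
  set d0 := targets.foldl (fun d t => d.insert t ([] : List Int)) PySem.Dict.empty with hd0
  set dA := (PySem.List.pyRange 0 upto 1).foldl
      (fun d i => if d.contains (ch i) then d.modify (ch i) [] (· ++ [i]) else d) d0 with hdA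
  set dB := targets.foldl (fun d t => d.insert t (idxs t)) PySem.Dict.empty with hdB
  have hk0 : d0.keys = PySem.Set.ofList targets := positions_keys_base targets
  have hkA : dA.keys = PySem.Set.ofList targets := by
    rw [hdA, loopA_keys, hk0]
  have hkB : dB.keys = PySem.Set.ofList targets := positions_keys_alt idxs targets
  have hndA : dA.keys.Nodup := by rw [hkA]; exact PySem.Set.nodup_ofList targets
  have hndB : dB.keys.Nodup := by rw [hkB]; exact PySem.Set.nodup_ofList targets
  rw [PySem.Dict.items_eq_map_keys dA hndA ([] : List Int),
      PySem.Dict.items_eq_map_keys dB hndB ([] : List Int), hkA, hkB]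
  apply List.map_congr_left
  intro k hkmem
  have hmem : k ∈ targets := (PySem.Set.mem_ofList targets k).mp hkmem
  have hcont : d0.contains k = true := by
    rw [PySem.Dict.contains_eq_decide_mem_keys, hk0]
    simpa using hkmem
  have hA : dA.getD k [] = idxs k := by
    rw [hdA, loopA_getD ch _ d0 k hcont, hd0, foldl_insert_getD]
    by_cases h : k ∈ targets <;> simp [h, hidxs]
  have hB : dB.getD k [] = idxs k := by
    rw [hdB, foldl_insert_getD, if_pos hmem]
  rw [hA, hB]
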